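-- pv_equiv track=rewrite | github.com/ichihara-3/practice | arithmeticpazzle/q08.py | solve
-- ===== SOURCE A (Python) =====
-- def solve(n, now, visited):
--     if n == 0:
--         return 1
--
--     deadend = True
--     answer = 0
--     for move in ((0, 1), (1, 0), (0, -1), (-1, 0)):
--         moveto = (now[0]+move[0], now[1]+move[1])
--         if moveto in visited:
--             continue
--         else:
--             deadend = False
--             answer += solve(n-1, moveto, visited + [moveto])
--     return answer
-- ===== SOURCE B (Python) =====
-- def solve(n, now, visited):
--     # Iterative DFS with an explicit stack of frames instead of recursion.
--     stack = [(n, now, visited)]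
--     count = 0
--     while stack:
--         m, pos, vis = stack.pop()
--         if m == 0:
--             count += 1
--             continue
--         for move in ((0, 1), (1, 0), (0, -1), (-1, 0)):
--             moveto = (pos[0] + move[0], pos[1] + move[1])
--             if moveto not in vis:
--                 stack.append((m - 1, moveto, vis + [moveto]))
--     return count
-- ===== Notes on version B (the rewrite author's own statement) =====
-- stated objective: alternative
-- what changed: Replaces the recursive tree search with an iterative depth-first search over an explicit stack of (steps-left, position, visited) frames and a running counter.
import Mathlib
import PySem

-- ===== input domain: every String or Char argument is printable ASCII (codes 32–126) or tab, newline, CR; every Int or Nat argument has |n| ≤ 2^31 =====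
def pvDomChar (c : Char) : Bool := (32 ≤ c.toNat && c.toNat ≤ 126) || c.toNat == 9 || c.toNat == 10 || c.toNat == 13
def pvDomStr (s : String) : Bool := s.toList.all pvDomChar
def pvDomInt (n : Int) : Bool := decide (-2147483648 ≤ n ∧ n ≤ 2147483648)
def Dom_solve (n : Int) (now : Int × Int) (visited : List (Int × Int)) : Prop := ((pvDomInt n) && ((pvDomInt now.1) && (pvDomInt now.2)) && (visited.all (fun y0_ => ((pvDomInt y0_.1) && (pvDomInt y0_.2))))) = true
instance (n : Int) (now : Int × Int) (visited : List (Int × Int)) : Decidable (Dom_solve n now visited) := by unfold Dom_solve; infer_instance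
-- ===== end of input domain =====

-- B rewrites A's recursive tree search as an iterative DFS over an explicit stack of frames
-- (same counts, different decomposition; objective: alternative, not faster).
-- Pre_solve excludes n < 0, where Python A raises RecursionError (and Python B loops forever).

-- ===== PORT A =====
-- Recursion on the Nat fuel n.toNat (= n on Pre_); the body is A's code step for step.
def solveGo : Nat → (Int × Int) → List (Int × Int) → Int
  | 0, _, _ => 1
  | Nat.succ k, now, visited =>
      [((0:Int), (1:Int)), (1, 0), (0, -1), (-1, 0)].foldl
        (fun answer move =>
          if (now.1 + move.1, now.2 + move.2) ∈ visited then answer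
          else answer + solveGo k (now.1 + move.1, now.2 + move.2)
              (visited ++ [(now.1 + move.1, now.2 + move.2)])) 0

def solve (n : Int) (now : Int × Int) (visited : List (Int × Int)) : Int :=
  if n < 0 then 0   -- totality guard: Python diverges here (outside Pre_solve)
  else solveGo n.toNat now visited

-- ===== PORT B =====
-- stack frame: (steps left, position, visited)
def pushChildren (m : Int) (pos : Int × Int) (vis : List (Int × Int))
    (st : List (Int × (Int × Int) × List (Int × Int))) :
    List (Int × (Int × Int) × List (Int × Int)) :=
  [((0:Int), (1:Int)), (1, 0), (0, -1), (-1, 0)].foldl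
    (fun st move =>
      if (pos.1 + move.1, pos.2 + move.2) ∈ vis then st
      else (m - 1, (pos.1 + move.1, pos.2 + move.2),
            vis ++ [(pos.1 + move.1, pos.2 + move.2)]) :: st) st

def loopMeasure (st : List (Int × (Int × Int) × List (Int × Int))) : Nat :=
  (st.map (fun f => 5 ^ (f.1.toNat + 1))).sum

theorem loopMeasure_foldl_le (m : Int) (pos : Int × Int) (vis : List (Int × Int))
    (moves : List (Int × Int)) (st : List (Int × (Int × Int) × List (Int × Int))) :
    loopMeasure (moves.foldl
      (fun st move =>
        if (pos.1 + move.1, pos.2 + move.2) ∈ vis then st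
        else (m - 1, (pos.1 + move.1, pos.2 + move.2),
              vis ++ [(pos.1 + move.1, pos.2 + move.2)]) :: st) st)
      ≤ loopMeasure st + moves.length * 5 ^ ((m - 1).toNat + 1) := by
  induction moves generalizing st with
  | nil => simp
  | cons mv mvs ih =>
      simp only [List.foldl_cons, List.length_cons, Nat.succ_mul]
      by_cases h : (pos.1 + mv.1, pos.2 + mv.2) ∈ vis
      · rw [if_pos h]
        exact le_trans (ih st) (Nat.add_le_add_left (Nat.le_add_right _ _) _)
      · rw [if_neg h]
        refine le_trans (ih _) ?_
        simp only [loopMeasure, List.map_cons, List.sum_cons]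
        omega

theorem pushChildren_measure_lt (m : Int) (hm : 0 < m) (pos : Int × Int)
    (vis : List (Int × Int)) (st : List (Int × (Int × Int) × List (Int × Int))) :
    loopMeasure (pushChildren m pos vis st) < loopMeasure ((m, pos, vis) :: st) := by
  have h := loopMeasure_foldl_le m pos vis [((0:Int), (1:Int)), (1, 0), (0, -1), (-1, 0)] st
  have hton : (m - 1).toNat + 1 = m.toNat := by omega
  have hb : 0 < 5 ^ m.toNat := pow_pos (by norm_num) _
  have hpow : 4 * 5 ^ ((m - 1).toNat + 1) < 5 ^ (m.toNat + 1) := by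
    rw [hton, pow_succ]; omega
  unfold pushChildren
  simp only [loopMeasure, List.map_cons, List.sum_cons, List.length_cons,
    List.length_nil] at h ⊢
  omega

def loop : List (Int × (Int × Int) × List (Int × Int)) → Int → Int
  | [], count => count
  | (m, pos, vis) :: rest, count =>
      if m = 0 then loop rest (count + 1)
      else if m < 0 then loop rest count   -- totality guard: Python diverges here (outside Pre_solve)
      else loop (pushChildren m pos vis rest) count
termination_by st _ => loopMeasure st
decreasing_by
  · simp [loopMeasure]
  · simp [loopMeasure]
  · exact pushChildren_measure_lt m (by omega) pos vis rest

def solve_alt (n : Int) (now : Int × Int) (visited : List (Int × Int)) : Int :=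
  loop [(n, now, visited)] 0

-- ===== PRECONDITION & SPEC =====
-- Pre_solve excludes n < 0: there Python A recurses without a base case and raises RecursionError.
def Pre_solve (n : Int) (now : Int × Int) (visited : List (Int × Int)) : Prop := 0 ≤ n
instance (n : Int) (now : Int × Int) (visited : List (Int × Int)) : Decidable (Pre_solve n now visited) := by unfold Pre_solve; infer_instance
def pvWitness_solve : Int × (Int × Int) × (List (Int × Int)) := (3, (0, 0), [(0, 0)])

def Spec_solve (n : Int) (now : Int × Int) (visited : List (Int × Int)) (out : Int) : Prop := out = solve_alt n now visited
instance (n : Int) (now : Int × Int) (visited : List (Int × Int)) (out : Int) : Decidable (Spec_solve n now visited out) := by unfold Spec_solve; infer_instance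

-- ===== CLAIM (what is proved, stated in full; the proofs are below) =====
def Claim_equal_solve : Prop := ∀ (n : Int) (now : Int × Int) (visited : List (Int × Int)), Dom_solve n now visited → Pre_solve n now visited → Spec_solve n now visited (solve n now visited)

-- ===== LEMMAS AND PROOFS =====

-- the value A's port assigns to a stack frame
def frameVal (f : Int × (Int × Int) × List (Int × Int)) : Int :=
  solve f.1 f.2.1 f.2.2

theorem foldl_push_sum (m : Int) (pos : Int × Int) (vis : List (Int × Int))
    (moves : List (Int × Int)) :
    ∀ (st : List (Int × (Int × Int) × List (Int × Int))) (a : Int),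
    (moves.foldl
        (fun acc move =>
          if (pos.1 + move.1, pos.2 + move.2) ∈ vis then acc
          else acc + solve (m - 1) (pos.1 + move.1, pos.2 + move.2)
              (vis ++ [(pos.1 + move.1, pos.2 + move.2)])) a)
      + ((st.map frameVal).sum)
    = (((moves.foldl
        (fun st move =>
          if (pos.1 + move.1, pos.2 + move.2) ∈ vis then st
          else (m - 1, (pos.1 + move.1, pos.2 + move.2),
                vis ++ [(pos.1 + move.1, pos.2 + move.2)]) :: st) st).map frameVal).sum)
      + a := by
  induction moves with
  | nil => intro st a; simp [add_comm]
  | cons mv mvs ih =>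
      intro st a
      simp only [List.foldl_cons]
      by_cases h : (pos.1 + mv.1, pos.2 + mv.2) ∈ vis
      · simp only [h, if_true]; exact ih st a
      · simp only [h, if_false]
        have := ih ((m - 1, (pos.1 + mv.1, pos.2 + mv.2), vis ++ [(pos.1 + mv.1, pos.2 + mv.2)]) :: st)
          (a + solve (m - 1) (pos.1 + mv.1, pos.2 + mv.2) (vis ++ [(pos.1 + mv.1, pos.2 + mv.2)]))
        simp only [List.map_cons, List.sum_cons, frameVal] at this ⊢
        omega

theorem solve_pos (m : Int) (hm : 0 < m) (pos : Int × Int) (vis : List (Int × Int)) :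
    solve m pos vis =
      [((0:Int), (1:Int)), (1, 0), (0, -1), (-1, 0)].foldl
        (fun answer move =>
          if (pos.1 + move.1, pos.2 + move.2) ∈ vis then answer
          else answer + solve (m - 1) (pos.1 + move.1, pos.2 + move.2)
              (vis ++ [(pos.1 + move.1, pos.2 + move.2)])) 0 := by
  have h1 : ¬ m < 0 := by omega
  have h2 : ¬ m - 1 < 0 := by omega
  have h3 : m.toNat = (m - 1).toNat + 1 := by omega
  simp only [solve, h1, if_false, h2, h3, solveGo]

theorem loop_sum (st : List (Int × (Int × Int) × List (Int × Int))) (c : Int) :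
    loop st c = c + (st.map frameVal).sum := by
  induction st, c using loop.induct with
  | case1 c => simp [loop]
  | case2 pos vis rest c ih =>
      rw [loop, if_pos rfl, ih]
      simp only [List.map_cons, List.sum_cons]
      have : frameVal ((0 : Int), pos, vis) = 1 := rfl
      omega
  | case3 m pos vis rest c hm hneg ih =>
      rw [loop]
      simp only [if_neg hm, if_pos hneg, ih, List.map_cons, List.sum_cons]
      have : frameVal (m, pos, vis) = 0 := by simp [frameVal, solve, hneg]
      omega
  | case4 m pos vis rest c hm hneg ih =>
      rw [loop]
      simp only [if_neg hm, if_neg hneg, ih, List.map_cons, List.sum_cons]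
      have hsum := foldl_push_sum m pos vis [((0:Int), (1:Int)), (1, 0), (0, -1), (-1, 0)] rest 0
      have hval : frameVal (m, pos, vis) = solve m pos vis := rfl
      rw [hval, solve_pos m (by omega) pos vis]
      unfold pushChildren
      omega

-- ===== VERDICT (by name: the statement is the Claim_ definition above) =====
theorem solve_spec : Claim_equal_solve := by
  intro n now visited _ _
  unfold Spec_solve solve_alt
  rw [loop_sum]
  simp [frameVal]
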